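-- pv_equiv track=rewrite | github.com/NovelleP/AdventOfCode2021 | day10/day10_2.py | calc_sum_by_line
-- ===== SOURCE A (Python) =====
-- def calc_sum_by_line(filling_chars_by_line: list[list[str]], closing_char_to_points: dict[str, int]) -> list[int]:
--     line_sums = []
--     for filling_chars in filling_chars_by_line:
--         line_sum = 0
--         for char in filling_chars:
--             line_sum = line_sum * 5 + closing_char_to_points[char]
--         line_sums.append(line_sum)
--     return line_sums
-- ===== SOURCE B (Python) =====
-- def calc_sum_by_line(filling_chars_by_line: list[list[str]], closing_char_to_points: dict[str, int]) -> list[int]: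
--     def line_value(filling_chars):
--         n = len(filling_chars)
--         return sum(closing_char_to_points[char] * 5 ** (n - 1 - i)
--                    for i, char in enumerate(filling_chars))
--     return [line_value(filling_chars) for filling_chars in filling_chars_by_line]
-- ===== Notes on version B (the rewrite author's own statement) =====
-- stated objective: alternative
-- what changed: Replaces the nested accumulator loops (Horner scheme acc*5+points and an output list built by append) by a list comprehension mapping each line to a closed positional sum: sum of points[char] * 5**(n-1-i) over enumerate(line).
import Mathlib
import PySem

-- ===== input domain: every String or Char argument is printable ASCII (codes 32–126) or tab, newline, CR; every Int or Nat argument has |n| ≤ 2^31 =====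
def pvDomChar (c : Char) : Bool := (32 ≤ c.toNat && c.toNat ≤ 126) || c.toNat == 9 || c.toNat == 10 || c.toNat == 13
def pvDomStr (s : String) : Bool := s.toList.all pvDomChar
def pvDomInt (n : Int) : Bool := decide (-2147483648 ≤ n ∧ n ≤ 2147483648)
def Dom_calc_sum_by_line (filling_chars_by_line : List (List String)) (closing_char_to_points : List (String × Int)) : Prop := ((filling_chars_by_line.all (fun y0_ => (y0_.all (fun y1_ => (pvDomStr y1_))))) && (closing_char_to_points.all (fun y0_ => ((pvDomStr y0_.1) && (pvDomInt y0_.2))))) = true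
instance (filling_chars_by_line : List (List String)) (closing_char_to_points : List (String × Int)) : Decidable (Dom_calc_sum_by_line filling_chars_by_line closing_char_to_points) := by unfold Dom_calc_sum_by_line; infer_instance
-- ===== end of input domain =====

-- B replaces the nested accumulator loops (Horner scheme, output built by append) by a
-- map of each line to a closed positional sum Σ points[c]·5^(n-1-i); objective: alternative.

-- ===== PORT A =====
-- A: Horner scheme via two accumulator loops: line_sum = line_sum * 5 + points[char].
def calc_sum_by_line (filling_chars_by_line : List (List String)) (closing_char_to_points : List (String × Int)) : List Int :=
  filling_chars_by_line.foldl
    (fun line_sums filling_chars =>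
      line_sums ++
        [filling_chars.foldl
          (fun line_sum char =>
            line_sum * 5 + (PySem.Dict.mk closing_char_to_points).getD char 0)
          0])
    []

-- ===== PORT B =====
-- B: per-line closed positional sum over enumerate; i.toNat is exact since enumerate
-- indices here are the nonnegative Python ints 0..n-1.
def calc_sum_by_line_alt (filling_chars_by_line : List (List String)) (closing_char_to_points : List (String × Int)) : List Int :=
  filling_chars_by_line.map
    (fun filling_chars =>
      ((PySem.List.enumerate filling_chars).map
        (fun ic =>
          (PySem.Dict.mk closing_char_to_points).getD ic.2 0
            * 5 ^ (filling_chars.length - 1 - ic.1.toNat))).sum)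

-- ===== PRECONDITION & SPEC =====
-- Pre_ excludes exactly the inputs where Python raises KeyError: some char of some
-- line is missing from closing_char_to_points.
def Pre_calc_sum_by_line (filling_chars_by_line : List (List String)) (closing_char_to_points : List (String × Int)) : Prop :=
  (filling_chars_by_line.all
    (fun cs => cs.all (fun c => closing_char_to_points.any (fun p => p.1 == c)))) = true
instance (filling_chars_by_line : List (List String)) (closing_char_to_points : List (String × Int)) : Decidable (Pre_calc_sum_by_line filling_chars_by_line closing_char_to_points) := by unfold Pre_calc_sum_by_line; infer_instance

def pvWitness_calc_sum_by_line : List (List String) × (List (String × Int)) :=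
  ([[")", "]"], [], ["]"]], [(")", 1), ("]", 2)])

def Spec_calc_sum_by_line (filling_chars_by_line : List (List String)) (closing_char_to_points : List (String × Int)) (out : List Int) : Prop := out = calc_sum_by_line_alt filling_chars_by_line closing_char_to_points
instance (filling_chars_by_line : List (List String)) (closing_char_to_points : List (String × Int)) (out : List Int) : Decidable (Spec_calc_sum_by_line filling_chars_by_line closing_char_to_points out) := by unfold Spec_calc_sum_by_line; infer_instance

-- ===== CLAIM (what is proved, stated in full; the proofs are below) =====
def Claim_equal_calc_sum_by_line : Prop := ∀ (filling_chars_by_line : List (List String)) (closing_char_to_points : List (String × Int)), Dom_calc_sum_by_line filling_chars_by_line closing_char_to_points → Pre_calc_sum_by_line filling_chars_by_line closing_char_to_points → Spec_calc_sum_by_line filling_chars_by_line closing_char_to_points (calc_sum_by_line filling_chars_by_line closing_char_to_points)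

-- ===== LEMMAS AND PROOFS =====

-- A's outer append-accumulator loop is a map.
theorem foldl_append_map {α β : Type} (g : α → β) (l : List α) (init : List β) :
    l.foldl (fun acc x => acc ++ [g x]) init = init ++ l.map g := by
  induction l generalizing init with
  | nil => simp
  | cons x l ih => simp [List.foldl_cons, ih]

-- per-line equality: positional sum over enumerate = Horner left fold.
theorem line_eq (f : String → Int) (cs : List String) :
    ((PySem.List.enumerate cs).map
        (fun ic => f ic.2 * 5 ^ (cs.length - 1 - ic.1.toNat))).sum
      = cs.foldl (fun a c => a * 5 + f c) 0 := by
  induction cs using List.reverseRecOn with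
  | nil => simp [PySem.List.enumerate_nil]
  | append_singleton xs x ih =>
      rw [PySem.List.enumerate_append, List.map_append, List.sum_append,
        List.foldl_append]
      have hshift :
          (PySem.List.enumerate xs).map
              (fun ic => f ic.2 * 5 ^ ((xs ++ [x]).length - 1 - ic.1.toNat))
            = (PySem.List.enumerate xs).map
              (fun ic => 5 * (f ic.2 * 5 ^ (xs.length - 1 - ic.1.toNat))) := by
        apply List.map_congr_left
        intro p hp
        rcases (PySem.List.mem_enumerate_iff xs 0 p).1 hp with ⟨k, hk, rfl⟩
        have h1 : (xs ++ [x]).length - 1 - ((0 : Int) + (k : Int)).toNat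
            = (xs.length - 1 - k) + 1 := by
          simp [List.length_append]
          omega
        simp only [h1]
        have : ((0 : Int) + (k : Int)).toNat = k := by simp
        rw [this, pow_succ]
        ring
      rw [hshift, List.sum_map_mul_left, ih]
      simp [PySem.List.enumerate_cons, PySem.List.enumerate_nil, List.length_append]
      ring

-- ===== VERDICT (by name: the statement is the Claim_ definition above) =====
theorem calc_sum_by_line_spec : Claim_equal_calc_sum_by_line := by
  intro lines d _ _
  unfold Spec_calc_sum_by_line calc_sum_by_line calc_sum_by_line_alt
  rw [foldl_append_map]
  simp only [List.nil_append]
  exact List.map_congr_left fun cs _ => (line_eq _ cs).symm
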